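-- pv_equiv track=rewrite | github.com/ramosjanoah/nlp-imdb | #2_negation_handling.py | handling_negation_of_tokenized_sentence
-- ===== SOURCE A (Python) =====
-- def handling_negation_of_tokenized_sentence(tokenized_sentence):
--     # MELAKUKAN HANDLING TERHADAP SENTENCE YANG SUDAH DI TOKENIZED
--     negation_token = ["not", "n't", "no"]
--
--     negated = False
--     negation_handled_sentence = []
--
--     for token in tokenized_sentence:
--         if token in negation_token:
--             negated = True
--         else:
--             if negated:
--                 negation_handled_sentence.append("not " + token)
--             else:
--                 negation_handled_sentence.append(token)
--             negated = False
--     return negation_handled_sentence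
-- ===== SOURCE B (Python) =====
-- def handling_negation_of_tokenized_sentence(tokenized_sentence):
--     # Stateless single pass: drop negation words; prefix a token with "not "
--     # exactly when the previous token was a negation word (zip-with-previous,
--     # "" sentinel before the first token), instead of A's mutable `negated` flag.
--     negation_token = ("not", "n't", "no")
--     tokens = list(tokenized_sentence)
--     return [("not " + t if p in negation_token else t)
--             for p, t in zip([""] + tokens, tokens)
--             if t not in negation_token]
-- ===== Notes on version B (the rewrite author's own statement) =====
-- stated objective: simpler
-- what changed: Replaces A's mutable `negated` flag and explicit loop with a stateless zip-with-previous comprehension that prefixes a token exactly when the preceding token is a negation word.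
import Mathlib
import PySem

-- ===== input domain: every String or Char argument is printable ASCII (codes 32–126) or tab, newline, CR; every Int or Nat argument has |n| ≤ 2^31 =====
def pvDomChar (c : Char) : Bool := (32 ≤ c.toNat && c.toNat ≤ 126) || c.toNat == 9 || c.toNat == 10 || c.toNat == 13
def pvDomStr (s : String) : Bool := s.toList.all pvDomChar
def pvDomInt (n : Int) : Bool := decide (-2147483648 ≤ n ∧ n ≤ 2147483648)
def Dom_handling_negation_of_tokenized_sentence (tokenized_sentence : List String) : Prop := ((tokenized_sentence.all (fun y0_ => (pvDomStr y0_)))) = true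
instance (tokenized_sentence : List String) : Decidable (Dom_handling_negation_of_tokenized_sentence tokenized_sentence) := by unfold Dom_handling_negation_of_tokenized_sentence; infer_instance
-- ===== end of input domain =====

-- B replaces A's mutable `negated` flag with a stateless zip-with-previous pass (objective: simpler).

-- ===== PORT A =====
-- A: one loop carrying the mutable state (negated, negation_handled_sentence).
def handling_negation_of_tokenized_sentence (tokenized_sentence : List String) : List String :=
  let negation_token : List String := ["not", "n't", "no"]
  (tokenized_sentence.foldl
    (fun (s : Bool × List String) token =>
      if token ∈ negation_token then
        (true, s.2)
      else
        (false, s.2 ++ [if s.1 then "not " ++ token else token]))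
    (false, [])).2

-- ===== PORT B =====
-- B: zip each token with its predecessor ("" sentinel first), drop negation words,
-- prefix when the predecessor is a negation word.
def handling_negation_of_tokenized_sentence_alt (tokenized_sentence : List String) : List String :=
  let negation_token : List String := ["not", "n't", "no"]
  (List.zip ("" :: tokenized_sentence) tokenized_sentence).filterMap
    (fun pt =>
      if pt.2 ∈ negation_token then none
      else some (if pt.1 ∈ negation_token then "not " ++ pt.2 else pt.2))

-- ===== PRECONDITION & SPEC =====
def Spec_handling_negation_of_tokenized_sentence (tokenized_sentence : List String) (out : List String) : Prop := out = handling_negation_of_tokenized_sentence_alt tokenized_sentence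
instance (tokenized_sentence : List String) (out : List String) : Decidable (Spec_handling_negation_of_tokenized_sentence tokenized_sentence out) := by unfold Spec_handling_negation_of_tokenized_sentence; infer_instance

-- ===== CLAIM (what is proved, stated in full; the proofs are below) =====
def Claim_equal_handling_negation_of_tokenized_sentence : Prop := ∀ (tokenized_sentence : List String), Dom_handling_negation_of_tokenized_sentence tokenized_sentence → Spec_handling_negation_of_tokenized_sentence tokenized_sentence (handling_negation_of_tokenized_sentence tokenized_sentence)

-- ===== LEMMAS AND PROOFS =====

-- Invariant: A's flag after consuming a token equals "that token is a negation word",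
-- so carrying the previous token p (with flag = decide (p ∈ neg)) relates the two loops.
theorem hn_key (neg : List String) (xs : List String) :
    ∀ (p : String) (acc : List String),
      (xs.foldl
        (fun (s : Bool × List String) token =>
          if token ∈ neg then (true, s.2)
          else (false, s.2 ++ [if s.1 then "not " ++ token else token]))
        (decide (p ∈ neg), acc)).2
      = acc ++ (List.zip (p :: xs) xs).filterMap
          (fun pt =>
            if pt.2 ∈ neg then none
            else some (if pt.1 ∈ neg then "not " ++ pt.2 else pt.2)) := by
  induction xs with
  | nil => intro p acc; simp
  | cons t rest ih =>
    intro p acc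
    by_cases ht : t ∈ neg
    · rw [List.foldl_cons, if_pos ht,
        show (true, acc) = ((decide (t ∈ neg), acc) : Bool × List String) from by simp [ht],
        ih t acc]
      simp [ht]
    · rw [List.foldl_cons, if_neg ht,
        show ((false, acc ++ [if decide (p ∈ neg) = true then "not " ++ t else t]) :
            Bool × List String)
          = (decide (t ∈ neg), acc ++ [if decide (p ∈ neg) = true then "not " ++ t else t])
          from by simp [ht],
        ih t]
      simp [ht]

-- ===== VERDICT (by name: the statement is the Claim_ definition above) =====
theorem handling_negation_of_tokenized_sentence_spec : Claim_equal_handling_negation_of_tokenized_sentence := by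
  intro xs _
  unfold Spec_handling_negation_of_tokenized_sentence
  unfold handling_negation_of_tokenized_sentence handling_negation_of_tokenized_sentence_alt
  have h := hn_key ["not", "n't", "no"] xs "" []
  simpa using h
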